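-- pv_equiv track=rewrite | github.com/sdhawnicmr/My_first_repo | Dictionary_Questions/dict_digit_count.py | sum_of_items
-- ===== SOURCE A (Python) =====
-- def sum_of_digits(n):
--     sum_of_dig= 0
--     while n > 0:
--         dig = n % 10
--         sum_of_dig += dig
--         n= n//10
--     return sum_of_dig
--
-- def sum_of_items(l):
--     d = {}
--     for n in l:
--         sum_of_dig = sum_of_digits(n)
--         if sum_of_dig not in d:
--             d[sum_of_dig]=[]
--         d[sum_of_dig].append(n)
--
--
--     for k,v in d.items():
--         v = sorted(v,reverse=True)
--         d[k] = sum(v[:2])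
--
--     m =0
--     for v in d.values():
--         if v > m:
--             m = v
--     return m
-- ===== SOURCE B (Python) =====
-- def _dsum(m):
--     s = 0
--     while m > 0:
--         s += m % 10
--         m //= 10
--     return s
--
-- def sum_of_items(l):
--     # one pass: per digit-sum group keep only the two largest elements
--     best = {}
--     for n in l:
--         s = _dsum(n)
--         t = best.get(s)
--         if t is None:
--             best[s] = (n, None)
--         else:
--             a, b = t
--             if n > a:
--                 best[s] = (n, a)
--             elif b is None or n > b:
--                 best[s] = (a, n)
--     m = 0
--     for a, b in best.values():
--         tot = a if b is None else a + b
--         if tot > m: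
--             m = tot
--     return m
-- ===== Notes on version B (the rewrite author's own statement) =====
-- stated objective: alternative
-- what changed: Instead of collecting per-group lists, sorting each group descending and slicing the top two, B keeps only the two largest elements per digit-sum group in a single streaming pass and takes the max of their pair sums.
import Mathlib
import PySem

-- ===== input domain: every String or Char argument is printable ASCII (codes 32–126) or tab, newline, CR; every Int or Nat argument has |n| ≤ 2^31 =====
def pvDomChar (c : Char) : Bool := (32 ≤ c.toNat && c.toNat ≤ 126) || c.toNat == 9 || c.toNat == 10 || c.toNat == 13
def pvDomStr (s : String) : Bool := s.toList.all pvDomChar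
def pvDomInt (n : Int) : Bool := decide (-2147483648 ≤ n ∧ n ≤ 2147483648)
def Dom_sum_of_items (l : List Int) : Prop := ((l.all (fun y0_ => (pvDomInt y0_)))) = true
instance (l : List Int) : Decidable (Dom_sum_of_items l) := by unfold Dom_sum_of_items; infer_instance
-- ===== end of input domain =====

-- B replaces A's group-lists + per-group descending sort + top-2 slice by a single
-- streaming pass that keeps only the two largest elements of each digit-sum group
-- (objective: alternative algorithm of similar measured cost; no per-group sort or copied lists).

-- ===== PORT A =====
-- while n > 0: dig = n % 10; sum_of_dig += dig; n = n // 10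
def sum_of_digits_loop (n acc : Int) : Int :=
  if 0 < n then sum_of_digits_loop (PySem.Int.floordiv n 10) (acc + PySem.Int.mod n 10) else acc
termination_by n.toNat
decreasing_by
  unfold PySem.Int.floordiv
  rw [Int.fdiv_eq_ediv_of_nonneg _ (by norm_num)]
  omega

def sum_of_digits (n : Int) : Int := sum_of_digits_loop n 0

def sum_of_items (l : List Int) : Int :=
  -- for n in l: group n under its digit sum
  let d : PySem.Dict Int (List Int) :=
    l.foldl (fun d n =>
      let s := sum_of_digits n
      let d := if d.contains s then d else d.insert s ([] : List Int)
      d.modify s [] (fun v => v ++ [n])) PySem.Dict.empty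
  -- for k,v in d.items(): d[k] = sum(sorted(v, reverse=True)[:2])
  -- (Python reuses d with int values; Lean dicts are homogeneous, so the rebuilt
  --  dict is a fresh one with the same keys in the same order — exact, since every
  --  key is overwritten exactly once from its original value)
  let d2 : PySem.Dict Int Int :=
    PySem.Dict.mk (d.items.map (fun kv =>
      (kv.1, (PySem.List.slice (PySem.List.sorted kv.2 (fun x => x) true) none (some 2)).sum)))
  -- m = 0; for v in d.values(): if v > m: m = v
  d2.values.foldl (fun m v => if m < v then v else m) 0

-- ===== PORT B =====
-- while m > 0: s += m % 10; m //= 10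
def pv_dsum_loop (m s : Int) : Int :=
  if 0 < m then pv_dsum_loop (PySem.Int.floordiv m 10) (s + PySem.Int.mod m 10) else s
termination_by m.toNat
decreasing_by
  unfold PySem.Int.floordiv
  rw [Int.fdiv_eq_ediv_of_nonneg _ (by norm_num)]
  omega

def pv_dsum (m : Int) : Int := pv_dsum_loop m 0

def sum_of_items_alt (l : List Int) : Int :=
  let best : PySem.Dict Int (Int × Option Int) :=
    l.foldl (fun d n =>
      let s := pv_dsum n
      match d.get? s with
      | none => d.insert s (n, none)
      | some (a, b) =>
        if a < n then d.insert s (n, some a)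
        else
          match b with
          | none => d.insert s (a, some n)
          | some bb => if bb < n then d.insert s (a, some n) else d) PySem.Dict.empty
  best.values.foldl (fun m t =>
    let tot := match t.2 with | none => t.1 | some b => t.1 + b
    if m < tot then tot else m) 0

-- ===== PRECONDITION & SPEC =====
def Spec_sum_of_items (l : List Int) (out : Int) : Prop := out = sum_of_items_alt l
instance (l : List Int) (out : Int) : Decidable (Spec_sum_of_items l out) := by unfold Spec_sum_of_items; infer_instance

-- ===== CLAIM (what is proved, stated in full; the proofs are below) =====
def Claim_equal_sum_of_items : Prop := ∀ (l : List Int), Dom_sum_of_items l → Spec_sum_of_items l (sum_of_items l)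

-- ===== LEMMAS AND PROOFS =====

-- the two digit-sum loops are the same recursion
theorem pv_dsum_loop_eq_aux (k : Nat) :
    ∀ (n acc : Int), n.toNat < k → pv_dsum_loop n acc = sum_of_digits_loop n acc := by
  induction k with
  | zero => intro n acc h; omega
  | succ k ih =>
    intro n acc h
    rw [pv_dsum_loop, sum_of_digits_loop]
    split_ifs with h0
    · refine ih _ _ ?_
      unfold PySem.Int.floordiv
      rw [Int.fdiv_eq_ediv_of_nonneg _ (by norm_num)]
      omega
    · rfl

theorem pv_dsum_loop_eq (n acc : Int) : pv_dsum_loop n acc = sum_of_digits_loop n acc :=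
  pv_dsum_loop_eq_aux (n.toNat + 1) n acc (by omega)

theorem pv_dsum_eq (n : Int) : pv_dsum n = sum_of_digits n := pv_dsum_loop_eq n 0

-- B's per-group update, as a function of the previous state
def pvUpd : Option (Int × Option Int) → Int → Int × Option Int
  | none, n => (n, none)
  | some (a, b), n =>
    if a < n then (n, some a)
    else
      match b with
      | none => (a, some n)
      | some bb => if bb < n then (a, some n) else (a, b)

-- the state B's fold would reach from the list of a group's elements
def pvState (v : List Int) : Option (Int × Option Int) :=
  v.foldl (fun st n => some (pvUpd st n)) none

def pvPairL : Int × Option Int → List Int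
  | (a, none) => [a]
  | (a, some b) => [a, b]

theorem pvState_append (v : List Int) (n : Int) :
    pvState (v ++ [n]) = some (pvUpd (pvState v) n) := by
  simp [pvState, List.foldl_append]

theorem pvState_eq_none (v : List Int) (h : pvState v = none) : v = [] := by
  rcases v with _ | ⟨x, t⟩
  · rfl
  · exfalso
    have : ∀ (t : List Int) (p : Int × Option Int),
        (t.foldl (fun st n => some (pvUpd st n)) (some p)).isSome := by
      intro t
      induction t with
      | nil => intro p; simp
      | cons y t ih => intro p; simpa using ih (pvUpd (some p) y)
    have h2 := this t (pvUpd none x)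
    simp [pvState, List.foldl_cons] at h
    rw [h] at h2
    simp at h2

-- A's top-2-of-descending-sort, as a function of the previous top-2 list
theorem take_two_insertBy (s : List Int) (n : Int) :
    (PySem.List.insertBy (fun a b => decide (b < a)) n s).take 2 =
      (match s.take 2 with
       | [] => [n]
       | [a] => if a < n then [n, a] else [a, n]
       | a :: b :: _ => if a < n then [n, a] else if b < n then [a, n] else [a, b]) := by
  rcases s with _ | ⟨a, _ | ⟨b, t⟩⟩
  · simp [PySem.List.insertBy]
  · by_cases h : a < n <;> simp [PySem.List.insertBy, h]
  · by_cases h : a < n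
    · simp [PySem.List.insertBy, h]
    · by_cases hb : b < n <;> simp [PySem.List.insertBy, h, hb]

theorem take_two_sorted_append (v : List Int) (n : Int) :
    ((PySem.List.sorted (v ++ [n]) (fun x => x) true).take 2) =
      (match (PySem.List.sorted v (fun x => x) true).take 2 with
       | [] => [n]
       | [a] => if a < n then [n, a] else [a, n]
       | a :: b :: _ => if a < n then [n, a] else if b < n then [a, n] else [a, b]) := by
  rw [PySem.List.sorted_rev_eq_foldl_insertBy, PySem.List.sorted_rev_eq_foldl_insertBy,
    List.foldl_append]
  simp only [List.foldl_cons, List.foldl_nil]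
  exact take_two_insertBy _ n

-- core: B's pair is exactly the first two elements of A's descending sort
theorem pvPairL_state (v : List Int) (p : Int × Option Int) (h : pvState v = some p) :
    pvPairL p = (PySem.List.sorted v (fun x => x) true).take 2 := by
  induction v using List.reverseRecOn generalizing p with
  | nil => simp [pvState] at h
  | append_singleton v n ih =>
    rw [pvState_append] at h
    injection h with h
    subst h
    rw [take_two_sorted_append]
    rcases hst : pvState v with _ | q
    · have := pvState_eq_none v hst
      subst this
      simp [PySem.List.sorted, pvUpd, pvPairL]
    · have hq := ih q hst
      rcases q with ⟨a, _ | b⟩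
      · simp only [pvPairL] at hq
        rw [← hq]
        by_cases hn : a < n <;> simp [pvUpd, pvPairL, hn]
      · simp only [pvPairL] at hq
        rw [← hq]
        by_cases hn : a < n
        · simp [pvUpd, pvPairL, hn]
        · by_cases hb : b < n <;> simp [pvUpd, pvPairL, hn, hb]

theorem pvPairL_sum (p : Int × Option Int) :
    (pvPairL p).sum = (match p.2 with | none => p.1 | some b => p.1 + b) := by
  rcases p with ⟨a, _ | b⟩ <;> simp [pvPairL]

-- insert with the value already present is the identity
theorem insert_get?_self {ν : Type} (d : PySem.Dict Int ν) (k : Int) (v : ν)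
    (hnd : d.keys.Nodup) (h : d.get? k = some v) : d.insert k v = d := by
  apply PySem.Dict.ext
  rw [PySem.Dict.items_insert_of_contains _ v
    (by rw [PySem.Dict.contains_eq_isSome_get?, h]; rfl)]
  have hp : ∀ p ∈ d.items, (if p.1 == k then (k, v) else p) = p := by
    intro p hp
    by_cases hk : p.1 = k
    · subst hk
      have := PySem.Dict.get?_of_mem_items d (by simpa using hp) hnd
      rw [h] at this
      injection this with this
      simp [this]
    · simp [hk]
  rw [List.map_congr_left hp, List.map_id']

-- the fold invariant
def pvInv (dA : PySem.Dict Int (List Int)) (dB : PySem.Dict Int (Int × Option Int)) : Prop :=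
  dA.keys = dB.keys ∧ dA.keys.Nodup ∧
    ∀ k ∈ dA.keys, pvState (dA.getD k []) = some (dB.getD k (0, none))

theorem pvInv_step (dA : PySem.Dict Int (List Int)) (dB : PySem.Dict Int (Int × Option Int))
    (n : Int) (h : pvInv dA dB) :
    pvInv
      ((if dA.contains (sum_of_digits n) then dA
        else dA.insert (sum_of_digits n) []).modify (sum_of_digits n) [] (fun v => v ++ [n]))
      (match dB.get? (pv_dsum n) with
       | none => dB.insert (pv_dsum n) (n, none)
       | some (a, b) =>
         if a < n then dB.insert (pv_dsum n) (n, some a)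
         else
           match b with
           | none => dB.insert (pv_dsum n) (a, some n)
           | some bb => if bb < n then dB.insert (pv_dsum n) (a, some n) else dB) := by
  obtain ⟨hk, hnd, hv⟩ := h
  rw [pv_dsum_eq]
  set s := sum_of_digits n with hs
  have hndB : dB.keys.Nodup := hk ▸ hnd
  by_cases hc : dA.contains s = true
  · -- existing group
    have hsA : s ∈ dA.keys := (PySem.Dict.contains_iff_mem_keys dA s).mp hc
    have hsB : s ∈ dB.keys := hk ▸ hsA
    obtain ⟨p, hp⟩ : ∃ p, dB.get? s = some p := by
      rcases hgp : dB.get? s with _ | p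
      · exact absurd hsB ((PySem.Dict.get?_eq_none_iff_not_mem_keys dB s).mp hgp)
      · exact ⟨p, rfl⟩
    have hDB : dB.getD s (0, none) = p := PySem.Dict.getD_of_get?_eq_some _ _ hp
    have hstate : pvState (dA.getD s []) = some p := hDB ▸ hv s hsA
    have hBeq :
        (match dB.get? s with
         | none => dB.insert s (n, none)
         | some (a, b) =>
           if a < n then dB.insert s (n, some a)
           else
             match b with
             | none => dB.insert s (a, some n)
             | some bb => if bb < n then dB.insert s (a, some n) else dB) =
          dB.insert s (pvUpd (some p) n) := by
      rw [hp]
      rcases p with ⟨a, _ | bb⟩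
      · by_cases h1 : a < n <;> simp [pvUpd, h1]
      · by_cases h1 : a < n
        · simp [pvUpd, h1]
        · by_cases h2 : bb < n
          · simp [pvUpd, h1, h2]
          · simp only [pvUpd, if_neg h1, if_neg h2]
            exact (insert_get?_self dB s _ hndB hp).symm
    rw [if_pos hc, hBeq]
    have hcB : dB.contains s = true := (PySem.Dict.contains_iff_mem_keys dB s).mpr hsB
    have hkeysA : (dA.modify s [] (fun v => v ++ [n])).keys = dA.keys := by
      rw [PySem.Dict.keys_modify, PySem.Dict.keys_insert_of_contains _ _ hc]
    have hkeysB : (dB.insert s (pvUpd (some p) n)).keys = dB.keys :=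
      PySem.Dict.keys_insert_of_contains _ _ hcB
    refine ⟨by rw [hkeysA, hkeysB, hk], by rw [hkeysA]; exact hnd, ?_⟩
    intro k hkmem
    rw [hkeysA] at hkmem
    rw [PySem.Dict.getD_modify, PySem.Dict.getD_insert]
    by_cases hks : k = s
    · rw [if_pos hks, if_pos hks, pvState_append, hstate]
    · rw [if_neg hks, if_neg hks]
      exact hv k hkmem
  · -- new group
    have hcB : dB.contains s = false := by
      rcases hgb : dB.contains s with _ | _
      · rfl
      · exact absurd ((PySem.Dict.contains_iff_mem_keys dA s).mpr
          (hk ▸ (PySem.Dict.contains_iff_mem_keys dB s).mp hgb)) (by simpa using hc)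
    have hpB : dB.get? s = none := (PySem.Dict.get?_eq_none_iff_contains dB s).mpr hcB
    have hsnotin : s ∉ dA.keys := fun hm =>
      hc ((PySem.Dict.contains_iff_mem_keys dA s).mpr hm)
    have hBeq2 :
        (match dB.get? s with
         | none => dB.insert s (n, none)
         | some (a, b) =>
           if a < n then dB.insert s (n, some a)
           else
             match b with
             | none => dB.insert s (a, some n)
             | some bb => if bb < n then dB.insert s (a, some n) else dB) =
          dB.insert s (n, none) := by rw [hpB]
    rw [if_neg hc, hBeq2]
    have hcA' : (dA.insert s ([] : List Int)).contains s = true :=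
      PySem.Dict.contains_insert_self dA s []
    have hkeysA : ((dA.insert s ([] : List Int)).modify s []
        (fun v => v ++ [n])).keys = dA.keys ++ [s] := by
      rw [PySem.Dict.keys_modify, PySem.Dict.keys_insert_of_contains _ _ hcA',
        PySem.Dict.keys_insert_of_not_contains _ _ (by simpa using hc)]
    have hkeysB : (dB.insert s (n, none)).keys = dB.keys ++ [s] :=
      PySem.Dict.keys_insert_of_not_contains _ _ hcB
    refine ⟨by rw [hkeysA, hkeysB, hk], ?_, ?_⟩
    · rw [hkeysA]
      simpa [List.nodup_append] using ⟨hnd, fun a ha h => hsnotin (h ▸ ha)⟩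
    · intro k hkmem
      rw [hkeysA] at hkmem
      by_cases hks : k = s
      · subst hks
        simp [pvState, pvUpd]
      · simp only [PySem.Dict.getD_modify, PySem.Dict.getD_insert, if_neg hks]
        rcases List.mem_append.mp hkmem with hm | hm
        · exact hv k hm
        · exact absurd (by simpa using hm) hks

theorem pvInv_fold (l : List Int) :
    pvInv
      (l.foldl (fun d n =>
        let s := sum_of_digits n
        let d := if d.contains s then d else d.insert s ([] : List Int)
        d.modify s [] (fun v => v ++ [n])) PySem.Dict.empty)
      (l.foldl (fun d n =>
        let s := pv_dsum n
        match d.get? s with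
        | none => d.insert s (n, none)
        | some (a, b) =>
          if a < n then d.insert s (n, some a)
          else
            match b with
            | none => d.insert s (a, some n)
            | some bb => if bb < n then d.insert s (a, some n) else d) PySem.Dict.empty) := by
  have base : pvInv PySem.Dict.empty PySem.Dict.empty := by
    refine ⟨rfl, ?_, ?_⟩ <;> simp [PySem.Dict.empty, PySem.Dict.keys]
  have gen : ∀ (l : List Int) (dA : PySem.Dict Int (List Int))
      (dB : PySem.Dict Int (Int × Option Int)), pvInv dA dB →
      pvInv
        (l.foldl (fun d n =>
          let s := sum_of_digits n
          let d := if d.contains s then d else d.insert s ([] : List Int)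
          d.modify s [] (fun v => v ++ [n])) dA)
        (l.foldl (fun d n =>
          let s := pv_dsum n
          match d.get? s with
          | none => d.insert s (n, none)
          | some (a, b) =>
            if a < n then d.insert s (n, some a)
            else
              match b with
              | none => d.insert s (a, some n)
              | some bb => if bb < n then d.insert s (a, some n) else d) dB) := by
    intro l
    induction l with
    | nil => intro dA dB h; exact h
    | cons x t ih =>
      intro dA dB h
      rw [List.foldl_cons, List.foldl_cons]
      exact ih _ _ (pvInv_step dA dB x h)
  exact gen l _ _ base

-- ===== VERDICT (by name: the statement is the Claim_ definition above) =====
theorem sum_of_items_spec : Claim_equal_sum_of_items := by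
  intro l _
  unfold Spec_sum_of_items sum_of_items sum_of_items_alt
  obtain ⟨hk, hnd, hv⟩ := pvInv_fold l
  set dA := l.foldl (fun d n =>
      let s := sum_of_digits n
      let d := if d.contains s then d else d.insert s ([] : List Int)
      d.modify s [] (fun v => v ++ [n])) PySem.Dict.empty with hdA
  set dB := l.foldl (fun d n =>
      let s := pv_dsum n
      match d.get? s with
      | none => d.insert s (n, none)
      | some (a, b) =>
        if a < n then d.insert s (n, some a)
        else
          match b with
          | none => d.insert s (a, some n)
          | some bb => if bb < n then d.insert s (a, some n) else d) PySem.Dict.empty with hdB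
  show (PySem.Dict.mk (dA.items.map (fun kv =>
      (kv.1, (PySem.List.slice (PySem.List.sorted kv.2 (fun x => x) true)
        none (some 2)).sum)))).values.foldl (fun m v => if m < v then v else m) 0 =
    dB.values.foldl (fun m t =>
      let tot := match t.2 with | none => t.1 | some b => t.1 + b
      if m < tot then tot else m) 0
  rw [PySem.Dict.values_mk, List.map_map,
    PySem.Dict.items_eq_map_keys dA hnd ([] : List Int), List.map_map,
    PySem.Dict.values_eq_map_keys dB (hk ▸ hnd) ((0, none) : Int × Option Int), ← hk,
    List.foldl_map, List.foldl_map]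
  apply PySem.List.foldl_congr_mem
  intro m k hkm
  have hstate := hv k hkm
  have hpl := pvPairL_state _ _ hstate
  have hsum : (PySem.List.slice (PySem.List.sorted (dA.getD k []) (fun x => x) true)
      none (some 2)).sum =
      (match (dB.getD k (0, none)).2 with
       | none => (dB.getD k (0, none)).1
       | some b => (dB.getD k (0, none)).1 + b) := by
    rw [PySem.List.slice_to _ (by norm_num), (by rfl : (2 : Int).toNat = 2), ← hpl, pvPairL_sum]
  simp only [Function.comp]
  rw [hsum]
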